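-- pv_equiv track=rewrite | github.com/Jaimesotorguez/Proyecto_optimizacion_ruta | funciones_pantalla_lee_fichero.py | funcion_matriz_minutos
-- ===== SOURCE A (Python) =====
-- def funcion_matriz_minutos(matriz_direcciones):
--     matriz_minutos = []
--     matriz_km = []
--     for a in matriz_direcciones:
--         fila_minutos = []
--         fila_km = []
--         for b in a:
--             fila_minutos.append(b[0])
--             fila_km.append(b[1])
--         matriz_minutos.append(fila_minutos)
--         matriz_km.append(fila_km)
--
--     return matriz_minutos,matriz_km
-- ===== SOURCE B (Python) =====
-- def funcion_matriz_minutos(matriz_direcciones):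
--     # staged algorithm: flatten the whole matrix to one stream, project the two
--     # components globally, then re-slice into rows using the recorded row lengths
--     lens = [len(a) for a in matriz_direcciones]
--     flat = [b for a in matriz_direcciones for b in a]
--     flat_min = [b[0] for b in flat]
--     flat_km = [b[1] for b in flat]
--     matriz_minutos = []
--     matriz_km = []
--     i = 0
--     for n in lens:
--         matriz_minutos.append(flat_min[i:i + n])
--         matriz_km.append(flat_km[i:i + n])
--         i += n
--     return matriz_minutos, matriz_km
-- ===== Notes on version B (the rewrite author's own statement) =====
-- stated objective: alternative
-- what changed: Instead of A's row-by-row interleaved appends, B flattens the whole matrix into one stream, projects the minutes and km components globally, and then re-slices the two flat lists back into rows using the recorded row lengths and a running offset.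
import Mathlib
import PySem

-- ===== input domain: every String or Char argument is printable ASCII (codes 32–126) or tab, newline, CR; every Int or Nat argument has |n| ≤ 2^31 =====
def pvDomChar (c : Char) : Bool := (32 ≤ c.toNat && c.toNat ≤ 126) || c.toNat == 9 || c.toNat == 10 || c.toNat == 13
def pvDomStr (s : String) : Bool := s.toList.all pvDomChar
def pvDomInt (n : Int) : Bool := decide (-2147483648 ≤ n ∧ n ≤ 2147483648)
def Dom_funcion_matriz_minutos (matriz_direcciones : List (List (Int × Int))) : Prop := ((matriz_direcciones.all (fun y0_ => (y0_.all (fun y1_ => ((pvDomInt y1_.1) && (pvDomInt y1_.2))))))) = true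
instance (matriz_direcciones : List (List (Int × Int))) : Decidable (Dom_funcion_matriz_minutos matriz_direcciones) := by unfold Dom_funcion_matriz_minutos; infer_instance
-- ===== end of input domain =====

-- B replaces A's row-by-row double-append loops with a staged algorithm: flatten the whole
-- matrix into one stream, project the two components globally, then re-slice the flat
-- projections into rows using the recorded row lengths (alternative decomposition; same cost).

-- ===== PORT A =====
-- literal port: outer loop appends one row to each matrix; inner loop appends b[0] / b[1]
def funcion_matriz_minutos (matriz_direcciones : List (List (Int × Int))) : List (List Int) × List (List Int) :=
  matriz_direcciones.foldl
    (fun (acc : List (List Int) × List (List Int)) a =>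
      let fila := a.foldl (fun (f : List Int × List Int) b => (f.1 ++ [b.1], f.2 ++ [b.2])) ([], [])
      (acc.1 ++ [fila.1], acc.2 ++ [fila.2]))
    ([], [])

-- ===== PORT B =====
-- Source B: lens, flatten, project globally, then re-slice by running offset i (Python slice = PySem.List.slice)
def funcion_matriz_minutos_alt (matriz_direcciones : List (List (Int × Int))) : List (List Int) × List (List Int) :=
  let lens : List Int := matriz_direcciones.map (fun a => (a.length : Int))
  let flat : List (Int × Int) := matriz_direcciones.flatMap (fun a => a)
  let flatMin : List Int := flat.map (fun b => b.1)
  let flatKm : List Int := flat.map (fun b => b.2)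
  let r := lens.foldl
    (fun (s : List (List Int) × List (List Int) × Int) n =>
      (s.1 ++ [PySem.List.slice flatMin (some s.2.2) (some (s.2.2 + n))],
       s.2.1 ++ [PySem.List.slice flatKm (some s.2.2) (some (s.2.2 + n))],
       s.2.2 + n))
    ([], [], 0)
  (r.1, r.2.1)

-- ===== PRECONDITION & SPEC =====
def Spec_funcion_matriz_minutos (matriz_direcciones : List (List (Int × Int))) (out : List (List Int) × List (List Int)) : Prop := out = funcion_matriz_minutos_alt matriz_direcciones
instance (matriz_direcciones : List (List (Int × Int))) (out : List (List Int) × List (List Int)) : Decidable (Spec_funcion_matriz_minutos matriz_direcciones out) := by unfold Spec_funcion_matriz_minutos; infer_instance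

-- ===== CLAIM (what is proved, stated in full; the proofs are below) =====
def Claim_equal_funcion_matriz_minutos : Prop := ∀ (matriz_direcciones : List (List (Int × Int))), Dom_funcion_matriz_minutos matriz_direcciones → Spec_funcion_matriz_minutos matriz_direcciones (funcion_matriz_minutos matriz_direcciones)

-- ===== LEMMAS AND PROOFS =====
theorem pv_inner (a : List (Int × Int)) (f : List Int × List Int) :
    a.foldl (fun (f : List Int × List Int) b => (f.1 ++ [b.1], f.2 ++ [b.2])) f
      = (f.1 ++ a.map Prod.fst, f.2 ++ a.map Prod.snd) := by
  induction a generalizing f with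
  | nil => simp
  | cons b t ih => simp [List.foldl, ih]

theorem pv_outer (m : List (List (Int × Int))) (acc : List (List Int) × List (List Int)) :
    m.foldl
      (fun (acc : List (List Int) × List (List Int)) a =>
        let fila := a.foldl (fun (f : List Int × List Int) b => (f.1 ++ [b.1], f.2 ++ [b.2])) ([], [])
        (acc.1 ++ [fila.1], acc.2 ++ [fila.2]))
      acc
      = (acc.1 ++ m.map (fun a => a.map Prod.fst), acc.2 ++ m.map (fun a => a.map Prod.snd)) := by
  induction m generalizing acc with
  | nil => simp
  | cons a t ih =>
    rw [List.foldl_cons, ih]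
    simp [pv_inner]

-- the re-slicing loop of B reconstructs the per-row projections: invariant over the
-- unprocessed suffix t, with offset i = length of the already-processed prefix pre
theorem pv_regroup (t : List (List (Int × Int))) (pre : List (Int × Int))
    (accM accK : List (List Int)) :
    (t.map (fun a => (a.length : Int))).foldl
      (fun (s : List (List Int) × List (List Int) × Int) n =>
        (s.1 ++ [PySem.List.slice ((pre ++ t.flatMap (fun a => a)).map (fun b => b.1)) (some s.2.2) (some (s.2.2 + n))],
         s.2.1 ++ [PySem.List.slice ((pre ++ t.flatMap (fun a => a)).map (fun b => b.2)) (some s.2.2) (some (s.2.2 + n))],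
         s.2.2 + n))
      (accM, accK, (pre.length : Int))
      = (accM ++ t.map (fun a => a.map Prod.fst), accK ++ t.map (fun a => a.map Prod.snd),
         ((pre ++ t.flatMap (fun a => a)).length : Int)) := by
  induction t generalizing pre accM accK with
  | nil => simp
  | cons a t ih =>
    have hflat : pre ++ (a :: t).flatMap (fun a => a) = (pre ++ a) ++ t.flatMap (fun a => a) := by
      simp
    rw [List.map_cons, List.foldl_cons]
    have hsl : ∀ (g : Int × Int → Int),
        PySem.List.slice (((pre ++ a) ++ t.flatMap (fun a => a)).map g)
          (some (pre.length : Int)) (some ((pre.length : Int) + (a.length : Int)))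
          = a.map g := by
      intro g
      rw [PySem.List.slice_natCast_add]
      simp [List.map_append]
    have hlen : (pre.length : Int) + (a.length : Int) = ((pre ++ a).length : Int) := by
      simp
    rw [hflat, hsl, hsl, hlen, ih]
    simp

-- ===== VERDICT (by name: the statement is the Claim_ definition above) =====
theorem funcion_matriz_minutos_spec : Claim_equal_funcion_matriz_minutos := by
  intro m _
  show funcion_matriz_minutos m = funcion_matriz_minutos_alt m
  have hB := pv_regroup m [] [] []
  simp only [List.nil_append, List.length_nil, Nat.cast_zero] at hB
  simp only [funcion_matriz_minutos, funcion_matriz_minutos_alt, pv_outer, hB, List.nil_append]
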